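-- pv_equiv track=rewrite | github.com/HanzoRazer/luthiers-toolbox | scripts/ci/check_workflow_api_paths.py | _has_legacy_path
-- ===== SOURCE A (Python) =====
-- LEGACY_PREFIXES = [
--     "/cam/",
--     "/geometry/",
--     "/tooling/",
--     "/adaptive/",
--     "/machine/",
--     "/material/",
--     "/feeds/",
--     "/sim/",
-- ]
--
-- def _has_legacy_path(line: str) -> bool:
--     """
--     Check if a line contains a legacy API path.
--
--     Legacy paths are routes like /cam/... that are NOT prefixed with /api.
--     Canonical paths like /api/cam/... are allowed.
--     File paths like services/api/app/cam/... are also allowed.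
--     """
--     for pref in LEGACY_PREFIXES:
--         idx = line.find(pref)
--         while idx != -1:
--             # Check if /api comes right before this prefix (URL path)
--             # e.g., for "/api/cam/", idx would be 4, and "/api" would be at 0
--             is_canonical = False
--             if idx >= 4:
--                 before = line[idx - 4:idx]
--                 if before == "/api":
--                     is_canonical = True
--
--             # Also allow file paths like "services/api/app/cam/..."
--             # These have /api/ somewhere before, but not directly adjacent
--             if not is_canonical and "/api/" in line[:idx]:
--                 # It's a file path containing /api/ earlier
--                 is_canonical = True
--
--             if not is_canonical:
--                 # This is a true legacy path
--                 return True
--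
--             # Check for next occurrence
--             idx = line.find(pref, idx + 1)
--
--     return False
-- ===== SOURCE B (Python) =====
-- LEGACY_PREFIXES = [
--     "/cam/",
--     "/geometry/",
--     "/tooling/",
--     "/adaptive/",
--     "/machine/",
--     "/material/",
--     "/feeds/",
--     "/sim/",
-- ]
--
-- def _has_legacy_path(line: str) -> bool:
--     api = line.find("/api/")
--     hits = [i for i in (line.find(p) for p in LEGACY_PREFIXES) if i != -1]
--     earliest = min(hits, default=-1)
--     if earliest == -1:
--         return False
--     if api == -1:
--         return True
--     return earliest < api + 4
-- ===== Notes on version B (the rewrite author's own statement) =====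
-- stated objective: simpler
-- what changed: A's nested loop over every occurrence of every legacy prefix, each occurrence re-scanning the whole line before it for the canonical API marker, is replaced by computing two first-occurrence positions once (the API marker and the earliest legacy prefix) and returning a single comparison.
import Mathlib
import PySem

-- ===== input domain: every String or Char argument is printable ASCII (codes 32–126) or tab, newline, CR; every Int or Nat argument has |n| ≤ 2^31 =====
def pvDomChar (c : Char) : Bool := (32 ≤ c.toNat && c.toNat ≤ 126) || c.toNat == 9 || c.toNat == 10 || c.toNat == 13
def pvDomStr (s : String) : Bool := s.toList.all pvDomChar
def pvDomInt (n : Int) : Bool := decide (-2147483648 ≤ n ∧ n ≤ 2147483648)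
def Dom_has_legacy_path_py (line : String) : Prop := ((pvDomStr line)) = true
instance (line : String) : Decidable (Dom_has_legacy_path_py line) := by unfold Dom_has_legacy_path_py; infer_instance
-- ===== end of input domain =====

-- B replaces A's nested occurrence loop (with repeated substring rescans) by two
-- precomputed first-occurrence positions and one comparison; objective: simpler.

-- module-level constant shared by both implementations
def pvLegacyPrefixes : List String :=
  ["/cam/", "/geometry/", "/tooling/", "/adaptive/", "/machine/", "/material/", "/feeds/", "/sim/"]

-- ===== PORT A =====
-- inner `while idx != -1` loop of A; fuel only guards totality (idx strictly increases)
def pvInnerA (line pref : List Char) (idx : Int) : Nat → Bool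
  | 0 => false
  | fuel + 1 =>
    if idx = -1 then false
    else
      let isCanonical :=
        if 4 ≤ idx then
          decide (PySem.List.slice line (some (idx - 4)) (some idx) = "/api".toList)
        else false
      let isCanonical :=
        isCanonical || PySem.Chars.isIn "/api/".toList (PySem.List.slice line none (some idx))
      if isCanonical = false then true
      else pvInnerA line pref (PySem.Chars.findFrom line pref (idx + 1)) fuel

def has_legacy_path_py (line : String) : Bool :=
  pvLegacyPrefixes.any (fun pref =>
    pvInnerA line.toList pref.toList (PySem.Chars.find line.toList pref.toList)
      (line.toList.length + 2))

-- ===== PORT B =====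
def has_legacy_path_py_alt (line : String) : Bool :=
  let api := PySem.Str.find line "/api/"
  let hits := (pvLegacyPrefixes.map (fun p => PySem.Str.find line p)).filter (fun i => i != -1)
  let earliest := PySem.List.minD hits (fun i => i) (-1)
  if earliest = -1 then false
  else if api = -1 then true
  else decide (earliest < api + 4)

-- ===== PRECONDITION & SPEC =====
def Spec_has_legacy_path_py (line : String) (out : Bool) : Prop := out = has_legacy_path_py_alt line
instance (line : String) (out : Bool) : Decidable (Spec_has_legacy_path_py line out) := by unfold Spec_has_legacy_path_py; infer_instance

-- ===== CLAIM (what is proved, stated in full; the proofs are below) =====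
def Claim_equal_has_legacy_path_py : Prop := ∀ (line : String), Dom_has_legacy_path_py line → Spec_has_legacy_path_py line (has_legacy_path_py line)

-- ===== LEMMAS AND PROOFS =====

-- "some occurrence of "/api/" ends at or before position i" — the semantic content of A's canonicality test
def pvHasApiBefore (s : List Char) (i : Int) : Prop :=
  ∃ j : Nat, (j : Int) + 4 ≤ i ∧ "/api/".toList <+: s.drop j

-- A's canonicality condition at a true occurrence position n of pref equals pvHasApiBefore
lemma pv_cond_iff (s pref : List Char) (n : Nat)
    (hocc : pref <+: s.drop n) (hhead : pref.head? = some '/') :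
    (((if 4 ≤ (n : Int) then
        decide (PySem.List.slice s (some ((n : Int) - 4)) (some (n : Int)) = "/api".toList)
      else false)
      || PySem.Chars.isIn "/api/".toList (PySem.List.slice s none (some (n : Int)))) = true)
    ↔ pvHasApiBefore s (n : Int) := by
  have hplen : pref ≠ [] := by cases pref <;> simp_all
  constructor
  · intro h
    simp only [Bool.or_eq_true] at h
    rcases h with h | h
    · -- adjacent "/api" right before the occurrence
      split at h
      case isTrue h4 =>
        have hsl := of_decide_eq_true h
        have h4n : 4 ≤ n := by exact_mod_cast h4
        have hc : ((n : Int) - 4) = ((n - 4 : Nat) : Int) := by omega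
        rw [hc, PySem.List.slice_natCast] at hsl
        have hnn : n - (n - 4) = 4 := by omega
        rw [hnn] at hsl
        obtain ⟨t2, ht2⟩ := hocc
        cases pref with
        | nil => simp at hhead
        | cons c pr =>
          simp only [List.head?_cons, Option.some.injEq] at hhead
          subst hhead
          have hdn : s.drop n = '/' :: (pr ++ t2) := by rw [← ht2]; simp
          have hsplit : s.drop (n - 4) = "/api".toList ++ s.drop n := by
            conv_lhs => rw [← List.take_append_drop 4 (s.drop (n - 4))]
            rw [hsl, List.drop_drop]
            congr 2
            omega
          refine ⟨n - 4, by omega, ?_⟩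
          rw [hsplit, hdn]
          exact ⟨pr ++ t2, rfl⟩
      case isFalse => simp at h
    · -- "/api/" inside line[:idx]
      rw [PySem.List.slice_to_natCast] at h
      obtain ⟨j, hj⟩ := (PySem.Chars.exists_prefix_drop_iff_isIn _ _).mpr h
      have hlen : 5 ≤ ((s.take n).drop j).length := by
        have := hj.length_le
        simpa using this
      have htn : (s.take n).length ≤ n := by simp
      simp only [List.length_drop, List.length_take] at hlen
      refine ⟨j, by omega, ?_⟩
      have h1 : (s.take n).drop j <+: s.drop j := by
        rw [List.drop_take]
        exact List.take_prefix _ _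
      exact hj.trans h1
  · rintro ⟨j, hj4, hpre⟩
    have hj4' : j + 4 ≤ n := by exact_mod_cast hj4
    simp only [Bool.or_eq_true]
    by_cases hcase : j + 5 ≤ n
    · right
      have hsub : "/api/".toList <+: (s.take n).drop j := by
        rw [List.drop_take]
        have hl5 : ("/api/".toList).length = 5 := by decide
        refine List.prefix_take_iff.mpr ⟨hpre, ?_⟩
        rw [hl5]
        have := hpre.length_le
        simp only [List.length_drop] at this
        rw [hl5] at this
        omega
      rw [PySem.List.slice_to_natCast]
      exact (PySem.Chars.exists_prefix_drop_iff_isIn _ _).mp ⟨j, hsub⟩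
    · left
      have hjn : j + 4 = n := by omega
      have h4 : 4 ≤ (n : Int) := by omega
      rw [if_pos h4]
      apply decide_eq_true
      have hc : ((n : Int) - 4) = ((j : Nat) : Int) := by omega
      rw [hc, PySem.List.slice_natCast]
      have h4' : n - j = 4 := by omega
      rw [h4']
      obtain ⟨t, ht⟩ := hpre
      rw [← ht]
      rfl

-- once canonical, A's inner loop returns false forever
lemma pv_innerA_false (s pref : List Char) (hhead : pref.head? = some '/') :
    ∀ (fuel : Nat) (i : Int),
      (i = -1 ∨ (0 ≤ i ∧ pref <+: s.drop i.toNat ∧ pvHasApiBefore s i)) →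
      pvInnerA s pref i fuel = false := by
  intro fuel
  induction fuel with
  | zero => intro i _; simp [pvInnerA]
  | succ f ih =>
    rintro i (rfl | ⟨h0, hocc, hP⟩)
    · simp [pvInnerA]
    · have hne : i ≠ -1 := by omega
      obtain ⟨n, rfl⟩ : ∃ n : Nat, i = (n : Int) := ⟨i.toNat, (Int.toNat_of_nonneg h0).symm⟩
      rw [Int.toNat_natCast] at hocc
      have hcond := (pv_cond_iff s pref n hocc hhead).mpr hP
      simp only [pvInnerA, if_neg hne]
      rw [hcond, if_neg (show ¬(true = false) by simp)]
      have hplen : pref ≠ [] := by cases pref <;> simp_all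
      have hlt : n < s.length := by
        by_contra hge
        have : s.drop n = [] := List.drop_eq_nil_of_le (by omega)
        rw [this] at hocc
        exact hplen (List.prefix_nil.mp hocc)
      have hk : n + 1 ≤ s.length := by omega
      have hcast : ((n : Int) + 1) = ((n + 1 : Nat) : Int) := by push_cast; ring
      rw [hcast]
      by_cases hi' : PySem.Chars.findFrom s pref ((n + 1 : Nat) : Int) = -1
      · exact ih _ (Or.inl hi')
      · obtain ⟨hge, hpre', _⟩ := PySem.Chars.findFrom_natCast_spec s pref (n + 1) hk hi'
        apply ih
        right
        obtain ⟨j, hj, hjp⟩ := hP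
        exact ⟨by omega, hpre', ⟨j, by omega, hjp⟩⟩

lemma pv_hasApiBefore_iff (s : List Char) (i : Int) :
    pvHasApiBefore s i ↔
      (PySem.Chars.find s "/api/".toList ≠ -1 ∧ PySem.Chars.find s "/api/".toList + 4 ≤ i) := by
  have hb := PySem.Chars.neg_one_le_find (s := s) (sub := "/api/".toList)
  constructor
  · rintro ⟨j, hj, hpre⟩
    have hin := (PySem.Chars.exists_prefix_drop_iff_isIn _ _).mp ⟨j, hpre⟩
    have hne : PySem.Chars.find s "/api/".toList ≠ -1 :=
      (PySem.Chars.find_ne_neg_one_iff _ _).mpr ((PySem.Chars.isIn_iff_infix _ _).mp hin)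
    have h0 : 0 ≤ PySem.Chars.find s "/api/".toList := by omega
    obtain ⟨_, hmin⟩ := PySem.Chars.find_spec h0
    have hle : (PySem.Chars.find s "/api/".toList).toNat ≤ j := by
      by_contra hlt
      exact hmin j (by omega) hpre
    have := Int.toNat_of_nonneg h0
    refine ⟨hne, by omega⟩
  · rintro ⟨hne, hle⟩
    have h0 : 0 ≤ PySem.Chars.find s "/api/".toList := by omega
    obtain ⟨hp, _⟩ := PySem.Chars.find_spec h0
    refine ⟨(PySem.Chars.find s "/api/".toList).toNat, ?_, hp⟩
    have := Int.toNat_of_nonneg h0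
    omega

-- characterization of A's inner loop at the first occurrence, in terms of find "/api/"
lemma pv_innerA_char (s pref : List Char) (hhead : pref.head? = some '/') (f : Nat) :
    pvInnerA s pref (PySem.Chars.find s pref) (f + 1)
      = (decide (PySem.Chars.find s pref ≠ -1)
          && (decide (PySem.Chars.find s "/api/".toList = -1)
              || decide (PySem.Chars.find s pref < PySem.Chars.find s "/api/".toList + 4))) := by
  by_cases hf : PySem.Chars.find s pref = -1
  · rw [hf]; simp [pvInnerA]
  · have hb := PySem.Chars.neg_one_le_find (s := s) (sub := pref)
    have h0 : 0 ≤ PySem.Chars.find s pref := by omega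
    obtain ⟨n, hn⟩ : ∃ n : Nat, PySem.Chars.find s pref = (n : Int) :=
      ⟨(PySem.Chars.find s pref).toNat, (Int.toNat_of_nonneg h0).symm⟩
    obtain ⟨hp, _⟩ := PySem.Chars.find_spec h0
    rw [hn] at hp
    rw [Int.toNat_natCast] at hp
    by_cases hP : pvHasApiBefore s ((n : Nat) : Int)
    · rw [hn, pv_innerA_false s pref hhead _ _ (Or.inr ⟨by positivity, by simpa using hp, hP⟩)]
      obtain ⟨hapi, hle⟩ := (pv_hasApiBefore_iff s _).mp hP
      have hlt : ¬ ((n : Int) < PySem.Chars.find s "/api/".toList + 4) := by omega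
      rw [decide_eq_false hapi, decide_eq_false hlt]
      simp
    · have hcond :
        ((if 4 ≤ ((n : Nat) : Int) then
            decide (PySem.List.slice s (some (((n : Nat) : Int) - 4)) (some ((n : Nat) : Int)) = "/api".toList)
          else false)
          || PySem.Chars.isIn "/api/".toList (PySem.List.slice s none (some ((n : Nat) : Int)))) = false := by
        rw [Bool.eq_false_iff]
        intro hc
        exact hP ((pv_cond_iff s pref n hp hhead).mp hc)
      rw [hn]
      simp only [pvInnerA]
      rw [if_neg (show ¬((n : Int) = -1) by omega), if_pos hcond]
      have hnP := (pv_hasApiBefore_iff s ((n : Nat) : Int)).not.mp hP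
      rw [decide_eq_true (show ((n : Nat) : Int) ≠ -1 by omega)]
      by_cases hapi : PySem.Chars.find s "/api/".toList = -1
      · rw [decide_eq_true hapi]; rfl
      · have hlt : (n : Int) < PySem.Chars.find s "/api/".toList + 4 := by
          by_contra hge
          exact hnP ⟨hapi, by omega⟩
        rw [decide_eq_true hlt, decide_eq_false hapi]
        rfl


lemma pv_any_congr {α : Type} (l : List α) (f g : α → Bool)
    (h : ∀ x ∈ l, f x = g x) : l.any f = l.any g := by
  induction l with
  | nil => rfl
  | cons a t ih =>
    simp only [List.any_cons, h a (by simp), ih (fun x hx => h x (by simp [hx]))]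

-- the two programs agree, prefix by prefix via pv_innerA_char and the extremal properties of minD
lemma pv_final (s : List Char)
    (hheads : ∀ p ∈ pvLegacyPrefixes, p.toList.head? = some '/') :
    pvLegacyPrefixes.any (fun pref =>
        pvInnerA s pref.toList (PySem.Chars.find s pref.toList) (s.length + 2))
      = (if PySem.List.minD ((pvLegacyPrefixes.map (fun p => PySem.Chars.find s p.toList)).filter
            (fun i => i != -1)) (fun i => i) (-1) = -1 then false
         else if PySem.Chars.find s "/api/".toList = -1 then true
         else decide (PySem.List.minD ((pvLegacyPrefixes.map (fun p => PySem.Chars.find s p.toList)).filter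
            (fun i => i != -1)) (fun i => i) (-1) < PySem.Chars.find s "/api/".toList + 4)) := by
  have hchar : ∀ p ∈ pvLegacyPrefixes,
      pvInnerA s p.toList (PySem.Chars.find s p.toList) (s.length + 2)
        = (decide (PySem.Chars.find s p.toList ≠ -1)
            && (decide (PySem.Chars.find s "/api/".toList = -1)
                || decide (PySem.Chars.find s p.toList < PySem.Chars.find s "/api/".toList + 4))) :=
    fun p hp => pv_innerA_char s p.toList (hheads p hp) (s.length + 1)
  rw [pv_any_congr _ _ _ hchar]
  set api := PySem.Chars.find s "/api/".toList with hapi_def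
  set hits := (pvLegacyPrefixes.map (fun p => PySem.Chars.find s p.toList)).filter (fun i => i != -1) with hhits_def
  set earliest := PySem.List.minD hits (fun i => i) (-1) with he_def
  by_cases hnil : hits = []
  · have hall : ∀ p ∈ pvLegacyPrefixes, PySem.Chars.find s p.toList = -1 := by
      intro p hp
      have hmem : PySem.Chars.find s p.toList ∈ pvLegacyPrefixes.map (fun p => PySem.Chars.find s p.toList) :=
        List.mem_map_of_mem hp
      have := List.filter_eq_nil_iff.mp (hhits_def ▸ hnil) _ hmem
      simpa using this
    have he : earliest = -1 := by rw [he_def, hnil, PySem.List.minD_nil]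
    rw [if_pos he, List.any_eq_false]
    intro p hp
    simp [hall p hp]
  · have hmemD : earliest ∈ hits := PySem.List.minD_mem hits (fun i => i) (-1) hnil
    have hne : earliest ≠ -1 := by
      have := (List.mem_filter.mp hmemD).2
      simpa using this
    obtain ⟨p₀, hp₀, hfp₀⟩ := List.mem_map.mp (List.mem_filter.mp hmemD).1
    have hub : ∀ x ∈ hits, earliest ≤ x := by
      intro x hx
      exact PySem.List.key_minD_le hits (fun i => i) (-1) hnil x hx
    rw [if_neg hne]
    by_cases hapi : api = -1
    · rw [if_pos hapi, List.any_eq_true]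
      refine ⟨p₀, hp₀, ?_⟩
      rw [decide_eq_true (show PySem.Chars.find s p₀.toList ≠ -1 by rw [hfp₀]; exact hne),
        decide_eq_true hapi]
      rfl
    · rw [if_neg hapi]
      rcases lt_or_ge earliest (api + 4) with hlt | hge
      · rw [decide_eq_true hlt, List.any_eq_true]
        refine ⟨p₀, hp₀, ?_⟩
        rw [decide_eq_true (show PySem.Chars.find s p₀.toList ≠ -1 by rw [hfp₀]; exact hne),
          decide_eq_false hapi,
          decide_eq_true (show PySem.Chars.find s p₀.toList < api + 4 by rw [hfp₀]; exact hlt)]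
        rfl
      · rw [decide_eq_false (show ¬ earliest < api + 4 by omega), List.any_eq_false]
        intro p hp hcontra
        simp only [Bool.and_eq_true, Bool.or_eq_true, decide_eq_true_eq] at hcontra
        obtain ⟨hfp, hor⟩ := hcontra
        have hmem : PySem.Chars.find s p.toList ∈ hits := by
          rw [hhits_def]
          exact List.mem_filter.mpr ⟨List.mem_map_of_mem hp, by simpa using hfp⟩
        have hle := hub _ hmem
        rcases hor with h | h
        · exact hapi h
        · omega

-- ===== VERDICT (by name: the statement is the Claim_ definition above) =====
theorem has_legacy_path_py_spec : Claim_equal_has_legacy_path_py := by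
  intro line _
  unfold Spec_has_legacy_path_py has_legacy_path_py has_legacy_path_py_alt
  have hheads : ∀ p ∈ pvLegacyPrefixes, p.toList.head? = some '/' := by decide
  have := pv_final line.toList hheads
  simp only [PySem.Str.find_eq] at *
  exact this
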